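-- pv_equiv track=rewrite | github.com/ezzahiranass/pyhopper | pyhopper/Core/DataTree.py | _shortest_list_match
-- ===== SOURCE A (Python) =====
-- def _shortest_list_match(branches: list[list]) -> list[list]:
--     """Zip items, stopping at the shortest list."""
--     if not branches:
--         return []
--
--     min_len = min((len(b) for b in branches), default=0)
--     result = [[] for _ in branches]
--     for i in range(min_len):
--         for j, branch in enumerate(branches):
--             result[j].append(branch[i])
--     return result
-- ===== SOURCE B (Python) =====
-- def _shortest_list_match(branches: list[list]) -> list[list]:
--     """Zip items, stopping at the shortest list."""
--     if not branches:
--         return []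
--     min_len = min(len(b) for b in branches)
--     return [b[:min_len] for b in branches]
-- ===== Notes on version B (the rewrite author's own statement) =====
-- stated objective: simpler
-- what changed: Replaces the column-major index loop with per-element appends into pre-built accumulators by a single row-major pass slicing each branch to the minimum length.
import Mathlib
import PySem

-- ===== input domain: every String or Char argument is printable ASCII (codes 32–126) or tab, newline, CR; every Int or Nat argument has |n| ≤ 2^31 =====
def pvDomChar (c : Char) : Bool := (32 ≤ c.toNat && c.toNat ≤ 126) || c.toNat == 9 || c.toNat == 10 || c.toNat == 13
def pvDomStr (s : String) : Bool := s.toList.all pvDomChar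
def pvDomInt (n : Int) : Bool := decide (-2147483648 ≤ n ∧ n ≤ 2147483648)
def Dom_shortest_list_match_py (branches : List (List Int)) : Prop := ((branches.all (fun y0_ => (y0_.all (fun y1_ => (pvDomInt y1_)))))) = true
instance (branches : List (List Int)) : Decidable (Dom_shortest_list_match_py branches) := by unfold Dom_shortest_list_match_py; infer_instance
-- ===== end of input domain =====

-- B replaces A's column-major index loop (per-element appends) by one row-major pass
-- slicing each branch to the minimum length; objective: simpler.

-- ===== PORT A =====
-- inner loop body: for j, branch in enumerate(branches): result[j].append(branch[i])
-- (result always has exactly one accumulator per branch, so the enumerate-and-update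
-- pass is the pairwise zipWith; branch[i] is in range for every i the outer loop visits,
-- so pyGetD with default 0 is exact here)
def pvAStep (branches : List (List Int)) (result : List (List Int)) (i : Int) :
    List (List Int) :=
  List.zipWith (fun res branch => res ++ [PySem.List.pyGetD branch i 0]) result branches

def shortest_list_match_py (branches : List (List Int)) : List (List Int) :=
  if branches = [] then []
  else
    let min_len : Int :=
      (PySem.List.min? (branches.map (fun b => (b.length : Int))) (fun x => x)).getD 0
    let result : List (List Int) := branches.map (fun _ => [])
    (PySem.List.pyRange 0 min_len 1).foldl (pvAStep branches) result

-- ===== PORT B =====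
def shortest_list_match_py_alt (branches : List (List Int)) : List (List Int) :=
  if branches = [] then []
  else
    let min_len : Int :=
      (PySem.List.min? (branches.map (fun b => (b.length : Int))) (fun x => x)).getD 0
    branches.map (fun b => PySem.List.slice b none (some min_len))

-- ===== PRECONDITION & SPEC =====
def Spec_shortest_list_match_py (branches : List (List Int)) (out : List (List Int)) : Prop := out = shortest_list_match_py_alt branches
instance (branches : List (List Int)) (out : List (List Int)) : Decidable (Spec_shortest_list_match_py branches out) := by unfold Spec_shortest_list_match_py; infer_instance

-- ===== CLAIM (what is proved, stated in full; the proofs are below) =====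
def Claim_equal_shortest_list_match_py : Prop := ∀ (branches : List (List Int)), Dom_shortest_list_match_py branches → Spec_shortest_list_match_py branches (shortest_list_match_py branches)

-- ===== LEMMAS AND PROOFS =====

-- one element of the column append step: taking one more element
theorem pv_take_succ_eq {b : List Int} {n : Nat} (h : n < b.length) :
    b.take n ++ [PySem.List.pyGetD b (n : Int) 0] = b.take (n + 1) := by
  rw [PySem.List.pyGetD_natCast, List.take_add_one, List.getD_eq_getElem?_getD,
    List.getElem?_eq_getElem h]
  rfl

-- the enumerate pass appends column n onto every accumulator
theorem pv_zip_step (bs : List (List Int)) (n : Nat)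
    (h : ∀ b ∈ bs, n < b.length) :
    List.zipWith (fun res branch => res ++ [PySem.List.pyGetD branch (n : Int) 0])
        (bs.map (fun b => b.take n)) bs
      = bs.map (fun b => b.take (n + 1)) := by
  induction bs with
  | nil => rfl
  | cons b t ih =>
      simp only [List.map_cons, List.zipWith_cons_cons]
      rw [pv_take_succ_eq (h b (by simp)), ih (fun x hx => h x (by simp [hx]))]

-- the whole outer loop builds the n-prefixes, as long as n fits in every branch
theorem pv_loop (branches : List (List Int)) (n : Nat)
    (h : ∀ b ∈ branches, n ≤ b.length) :
    (PySem.List.pyRange 0 (n : Int) 1).foldl (pvAStep branches)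
        (branches.map (fun _ => []))
      = branches.map (fun b => b.take n) := by
  induction n with
  | zero => simp [PySem.List.pyRange_one_eq_nil]
  | succ k ih =>
      have hk : ∀ b ∈ branches, k ≤ b.length := fun b hb => Nat.le_of_succ_le (h b hb)
      have : ((k : Int) + 1) = ((k + 1 : Nat) : Int) := by push_cast; ring
      rw [← this, PySem.List.pyRange_one_succ_right (by positivity),
        List.foldl_append, ih hk]
      simpa [pvAStep] using pv_zip_step branches k (fun b hb => h b hb)

-- ===== VERDICT (by name: the statement is the Claim_ definition above) =====
theorem shortest_list_match_py_spec : Claim_equal_shortest_list_match_py := by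
  intro branches _
  unfold Spec_shortest_list_match_py shortest_list_match_py shortest_list_match_py_alt
  by_cases hnil : branches = []
  · simp [hnil]
  · simp only [if_neg hnil]
    set lens := branches.map (fun b => (b.length : Int)) with hlens
    have hne : lens ≠ [] := by simpa [hlens] using hnil
    obtain ⟨m, hm⟩ :
        ∃ m, PySem.List.min? lens (fun x => x) = some m := by
      cases hmin : PySem.List.min? lens (fun x => x) with
      | none => exact absurd ((PySem.List.min?_eq_none_iff lens (fun x => x)).mp hmin) hne
      | some m => exact ⟨m, rfl⟩
    have hmem : m ∈ lens := PySem.List.min?_mem hm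
    obtain ⟨b0, _, hb0⟩ := List.mem_map.mp (hlens ▸ hmem)
    have hm0 : 0 ≤ m := hb0 ▸ Int.natCast_nonneg _
    have hmin : ∀ b ∈ branches, m ≤ (b.length : Int) := by
      intro b hb
      exact PySem.List.min?_isMin hm _ (by exact hlens ▸ List.mem_map_of_mem hb)
    rw [hm]
    simp only [Option.getD_some]
    have hcast : m = ((m.toNat : Nat) : Int) := (Int.toNat_of_nonneg hm0).symm
    have hloop := pv_loop branches m.toNat
      (fun b hb => by have := hmin b hb; omega)
    rw [hcast, hloop]
    refine List.map_congr_left (fun b hb => ?_)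
    rw [← hcast, PySem.List.slice_to b hm0]
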